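-- pv_equiv track=rewrite | github.com/allenpeng0705/HomeClaw | base/util.py | _inject_tools_into_messages
-- ===== SOURCE A (Python) =====
-- from typing import Any, Dict, List, Optional, Tuple
--
-- def _inject_tools_into_messages(messages: List[Dict], tools_text: str) -> List[Dict]:
--     """Prepend tools text to the first system message, or add a system message. Returns a new list of messages."""
--     if not tools_text or not messages:
--         return list(messages)
--     out = []
--     injected = False
--     for m in messages:
--         if not isinstance(m, dict):
--             out.append(m)
--             continue
--         m_copy = dict(m)
--         if not injected and (m_copy.get("role") == "system"):
--             existing = (m_copy.get("content") or "")
--             if isinstance(existing, str):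
--                 m_copy["content"] = tools_text + "\n\n" + existing
--             else:
--                 m_copy["content"] = tools_text + "\n\n" + str(existing)
--             injected = True
--         out.append(m_copy)
--     if not injected:
--         out.insert(0, {"role": "system", "content": tools_text})
--     return out
-- ===== SOURCE B (Python) =====
-- def _inject_tools_into_messages(messages, tools_text):
--     """Prepend tools text to the first system message, or add a system message. Returns a new list of messages."""
--     if not tools_text or not messages:
--         return list(messages)
--     idx = next((i for i, m in enumerate(messages)
--                 if isinstance(m, dict) and m.get("role") == "system"), None)
--     out = [dict(m) if isinstance(m, dict) else m for m in messages]
--     if idx is None: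
--         out.insert(0, {"role": "system", "content": tools_text})
--     else:
--         m = out[idx]
--         existing = m.get("content") or ""
--         m["content"] = tools_text + "\n\n" + (existing if isinstance(existing, str) else str(existing))
--     return out
-- ===== Notes on version B (the rewrite author's own statement) =====
-- stated objective: simpler
-- what changed: Replaces A's single pass carrying an 'injected' flag with two separate steps: find the index of the first system message, copy the list, then rewrite (or prepend) at that one position.
import Mathlib
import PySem

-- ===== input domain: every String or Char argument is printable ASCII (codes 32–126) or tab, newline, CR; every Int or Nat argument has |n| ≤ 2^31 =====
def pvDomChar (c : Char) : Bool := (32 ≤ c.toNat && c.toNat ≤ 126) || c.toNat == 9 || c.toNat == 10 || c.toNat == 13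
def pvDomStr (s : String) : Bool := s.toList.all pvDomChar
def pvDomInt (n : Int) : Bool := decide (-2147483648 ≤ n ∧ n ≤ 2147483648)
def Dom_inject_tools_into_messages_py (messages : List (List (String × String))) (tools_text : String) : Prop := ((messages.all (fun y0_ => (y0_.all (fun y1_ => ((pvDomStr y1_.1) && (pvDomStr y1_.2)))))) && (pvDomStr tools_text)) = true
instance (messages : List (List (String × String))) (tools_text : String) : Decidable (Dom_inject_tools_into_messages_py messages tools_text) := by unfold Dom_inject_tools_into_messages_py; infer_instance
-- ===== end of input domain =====

-- ===== PORT A =====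
-- B restructures A's single flagged pass into find-index-then-rebuild; objective: simpler decomposition, same cost.
-- Python dicts are modelled as assoc lists (PySem.Dict.mk); every message is a dict here, so the
-- `isinstance(m, dict)` / `isinstance(existing, str)` branches of the Python are always the dict/str case.

-- shared line of both Pythons: existing = (m.get("content") or ""); m["content"] = tools_text + "\n\n" + existing
-- (`or ""` only collapses None/"" to "", and values are strings, so it is get-with-default "")
def pvSysInject (tools_text : String) (m : List (String × String)) : List (String × String) :=
  let existing : String := ((PySem.Dict.mk m).get? "content").getD ""
  ((PySem.Dict.mk m).insert "content" (tools_text ++ "\n\n" ++ existing)).items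

-- the for-loop of A, carrying the `injected` flag (dict(m) copy is the identity on the model)
def pvALoop (tools_text : String) : List (List (String × String)) → Bool → List (List (String × String)) × Bool
  | [], injected => ([], injected)
  | m :: rest, injected =>
    if injected = false ∧ (PySem.Dict.mk m).get? "role" = some "system" then
      let r := pvALoop tools_text rest true
      (pvSysInject tools_text m :: r.1, r.2)
    else
      let r := pvALoop tools_text rest injected
      (m :: r.1, r.2)

def inject_tools_into_messages_py (messages : List (List (String × String))) (tools_text : String) : List (List (String × String)) :=
  if tools_text = "" ∨ messages = [] then messages
  else
    let r := pvALoop tools_text messages false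
    if r.2 then r.1 else [("role", "system"), ("content", tools_text)] :: r.1

-- ===== PORT B =====
def inject_tools_into_messages_py_alt (messages : List (List (String × String))) (tools_text : String) : List (List (String × String)) :=
  if tools_text = "" ∨ messages = [] then messages
  else
    -- idx = next((i for i, m in enumerate(messages) if m.get("role") == "system"), None)
    match messages.findIdx? (fun m => (PySem.Dict.mk m).get? "role" == some "system") with
    -- out = [dict(m) for m in messages]  (identity on the model); then insert / mutate out[idx]
    | none => [("role", "system"), ("content", tools_text)] :: messages
    | some i => messages.modify i (pvSysInject tools_text)

-- ===== PRECONDITION & SPEC =====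
def Spec_inject_tools_into_messages_py (messages : List (List (String × String))) (tools_text : String) (out : List (List (String × String))) : Prop := out = inject_tools_into_messages_py_alt messages tools_text
instance (messages : List (List (String × String))) (tools_text : String) (out : List (List (String × String))) : Decidable (Spec_inject_tools_into_messages_py messages tools_text out) := by unfold Spec_inject_tools_into_messages_py; infer_instance

-- ===== CLAIM (what is proved, stated in full; the proofs are below) =====
def Claim_equal_inject_tools_into_messages_py : Prop := ∀ (messages : List (List (String × String))) (tools_text : String), Dom_inject_tools_into_messages_py messages tools_text → Spec_inject_tools_into_messages_py messages tools_text (inject_tools_into_messages_py messages tools_text)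

-- ===== LEMMAS AND PROOFS =====
-- once injected, the loop copies the rest unchanged
theorem pvALoop_true (tools_text : String) (l : List (List (String × String))) :
    pvALoop tools_text l true = (l, true) := by
  induction l with
  | nil => rfl
  | cons m rest ih => simp [pvALoop, ih]

-- no system message: the loop returns the input with the flag still false
theorem pvALoop_none (tools_text : String) (l : List (List (String × String)))
    (h : l.findIdx? (fun m => (PySem.Dict.mk m).get? "role" == some "system") = none) :
    pvALoop tools_text l false = (l, false) := by
  induction l with
  | nil => rfl
  | cons m rest ih =>
    rw [List.findIdx?_cons] at h
    by_cases hp : (PySem.Dict.mk m).get? "role" = some "system"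
    · simp [hp] at h
    · simp [pvALoop, hp, ih (by simpa [hp] using h)]

-- first system message at index i: the loop injects exactly there
theorem pvALoop_some (tools_text : String) (l : List (List (String × String))) (i : Nat)
    (h : l.findIdx? (fun m => (PySem.Dict.mk m).get? "role" == some "system") = some i) :
    pvALoop tools_text l false = (l.modify i (pvSysInject tools_text), true) := by
  induction l generalizing i with
  | nil => simp at h
  | cons m rest ih =>
    rw [List.findIdx?_cons] at h
    by_cases hp : (PySem.Dict.mk m).get? "role" = some "system"
    · simp [hp] at h
      subst h
      simp [pvALoop, hp, pvALoop_true]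
    · simp [hp] at h
      obtain ⟨j, hj, rfl⟩ := h
      simp [pvALoop, hp, ih j hj]

-- ===== VERDICT (by name: the statement is the Claim_ definition above) =====
theorem inject_tools_into_messages_py_spec : Claim_equal_inject_tools_into_messages_py := by
  intro messages tools_text _
  unfold Spec_inject_tools_into_messages_py inject_tools_into_messages_py inject_tools_into_messages_py_alt
  by_cases h0 : tools_text = "" ∨ messages = []
  · simp [h0]
  · simp only [h0, if_false]
    cases hf : messages.findIdx? (fun m => (PySem.Dict.mk m).get? "role" == some "system") with
    | none => simp [pvALoop_none tools_text messages hf]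
    | some i => simp [pvALoop_some tools_text messages i hf]
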